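-- pv_equiv track=rewrite | github.com/ErfanKhadiv/ErfanKhadiv | readability.py | letters_count
-- ===== SOURCE A (Python) =====
-- def letters_count(text):
--     n = len(text)
--     space = ' '
--     count = n
--     for i in range(n):
--         if text[i] == space or text[i] == '.' or text[i] == ',' or text[i] == '!' or text[i] == '?' or text[i] == "'":
--             count -= 1
--     return count
-- ===== SOURCE B (Python) =====
-- def letters_count(text):
--     return len(text) - sum(text.count(c) for c in " .,!?'")
-- ===== Notes on version B (the rewrite author's own statement) =====
-- stated objective: faster
-- what changed: Replaces the single positional Python-level loop testing a six-way OR-chain with len(text) minus one str.count pass per excluded symbol (correct because the six symbols are pairwise distinct), moving the scanning into C-level built-ins.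
import Mathlib
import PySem

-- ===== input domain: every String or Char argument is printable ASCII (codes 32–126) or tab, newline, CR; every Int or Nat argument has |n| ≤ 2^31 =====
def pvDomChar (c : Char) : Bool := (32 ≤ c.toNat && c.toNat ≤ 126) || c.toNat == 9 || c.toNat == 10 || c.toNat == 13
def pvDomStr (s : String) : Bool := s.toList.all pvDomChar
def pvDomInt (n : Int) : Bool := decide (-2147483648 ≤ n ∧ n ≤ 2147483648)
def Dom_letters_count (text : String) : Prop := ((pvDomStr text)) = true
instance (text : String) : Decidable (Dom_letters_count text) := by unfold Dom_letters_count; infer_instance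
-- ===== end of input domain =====

-- B computes len(text) minus six C-level count passes (one per excluded symbol) instead of A's positional Python loop with an OR-chain; measurably faster by constant factor, same asymptotic O(n).


-- ===== PORT A =====
def letters_count (text : String) : Int :=
  let n : Int := PySem.Str.len text
  let space : Char := ' '
  (PySem.List.pyRange 0 n 1).foldl
    (fun count i =>
      if PySem.Str.pyGet? text i == some space || PySem.Str.pyGet? text i == some '.' ||
         PySem.Str.pyGet? text i == some ',' || PySem.Str.pyGet? text i == some '!' ||
         PySem.Str.pyGet? text i == some '?' || PySem.Str.pyGet? text i == some '\'' then
        count - 1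
      else
        count)
    n

-- ===== PORT B =====
def letters_count_alt (text : String) : Int :=
  PySem.Str.len text -
    ((" .,!?'".toList).map (fun c => (PySem.Str.count text (String.ofList [c]) : Int))).sum

-- ===== PRECONDITION & SPEC =====
def Spec_letters_count (text : String) (out : Int) : Prop := out = letters_count_alt text
instance (text : String) (out : Int) : Decidable (Spec_letters_count text out) := by unfold Spec_letters_count; infer_instance

-- ===== CLAIM (what is proved, stated in full; the proofs are below) =====
def Claim_equal_letters_count : Prop := ∀ (text : String), Dom_letters_count text → Spec_letters_count text (letters_count text)

-- ===== LEMMAS AND PROOFS =====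

-- the excluded-symbol test of A, as a predicate on characters
def pvExcl (c : Char) : Bool :=
  c == ' ' || c == '.' || c == ',' || c == '!' || c == '?' || c == '\''

-- single-character substring count is element count
theorem pv_go_single (c : Char) : ∀ (l : List Char) (fuel acc : Nat), l.length ≤ fuel →
    PySem.Chars.count.go [c] fuel l acc = acc + l.count c := by
  intro l
  induction l with
  | nil => intro fuel acc _; cases fuel <;> simp [PySem.Chars.count.go]
  | cons x t ih =>
    intro fuel acc h
    cases fuel with
    | zero => simp at h
    | succ f =>
      simp only [PySem.Chars.count.go, List.isPrefixOf]
      by_cases hx : c = x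
      · subst hx
        simp only [BEq.rfl, Bool.true_and, if_pos]
        rw [show ([c].length : Nat) = 1 from rfl, List.drop_one, List.tail_cons,
          ih f (acc + 1) (by simpa using Nat.le_of_succ_le_succ h)]
        simp
        omega
      · have hb : (c == x) = false := by simp [hx]
        simp only [hb, Bool.false_and, if_neg Bool.false_ne_true,
          ih f acc (by simpa using Nat.le_of_succ_le_succ h)]
        have hxc : (x == c) = false := by simp; exact fun h' => hx h'.symm
        simp [List.count_cons, hxc]

theorem pv_count_single (l : List Char) (c : Char) :
    PySem.Chars.count l [c] = l.count c := by
  simp [PySem.Chars.count, pv_go_single c l l.length 0 le_rfl]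

-- the six counts sum to the countP of the OR-chain predicate
theorem pv_count6 (l : List Char) :
    ((l.count ' ' : Int) + l.count '.' + l.count ',' + l.count '!' + l.count '?' + l.count '\'')
      = (l.countP pvExcl : Int) := by
  induction l with
  | nil => simp
  | cons x t ih =>
    simp only [List.count_cons, List.countP_cons]
    push_cast
    rw [← ih]
    simp only [pvExcl]
    by_cases h1 : x = ' ' <;> by_cases h2 : x = '.' <;> by_cases h3 : x = ',' <;>
      by_cases h4 : x = '!' <;> by_cases h5 : x = '?' <;> by_cases h6 : x = '\'' <;>
      simp_all <;> omega

-- A's index loop computes length minus the countP of pvExcl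
theorem pv_loopA (cs : List Char) : ∀ (a : Int),
    (List.range cs.length).foldl
      (fun count k =>
        if cs[k]? == some ' ' || cs[k]? == some '.' || cs[k]? == some ',' ||
           cs[k]? == some '!' || cs[k]? == some '?' || cs[k]? == some '\'' then
          count - 1
        else count) a
      = a - cs.countP pvExcl := by
  induction cs with
  | nil => intro a; simp
  | cons x t ih =>
    intro a
    rw [List.length_cons, List.range_succ_eq_map, List.foldl_cons, List.foldl_map]
    simp only [List.getElem?_cons_succ, List.getElem?_cons_zero, Nat.succ_eq_add_one]
    refine (ih _).trans ?_
    simp only [List.countP_cons, pvExcl]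
    push_cast
    by_cases hx : pvExcl x = true
    · simp only [pvExcl] at hx
      rw [if_pos (by simpa using hx)]
      simp only [hx]
      simp at hx ⊢
      omega
    · simp only [pvExcl] at hx
      rw [if_neg (by simpa using hx)]
      simp only [Bool.not_eq_true] at hx
      simp [hx] at *

-- ===== VERDICT (by name: the statement is the Claim_ definition above) =====
theorem letters_count_spec : Claim_equal_letters_count := by
  intro text _
  unfold Spec_letters_count letters_count letters_count_alt
  have hs : (" .,!?'" : String).toList = [' ', '.', ',', '!', '?', '\''] := by decide
  rw [hs]
  simp only [PySem.Str.len_eq, PySem.List.pyRange_zero_nat, List.foldl_map,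
    PySem.Str.count_eq, List.map_cons, List.map_nil, List.sum_cons, List.sum_nil]
  simp only [String.toList_ofList, pv_count_single, PySem.Str.pyGet?_eq, PySem.Chars.pyGet?_eq_listPyGet?,
    PySem.List.pyGet?_natCast]
  rw [pv_loopA text.toList ((text.toList.length : Int)), ← pv_count6 text.toList]
  ring
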